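-- pv_equiv track=rewrite | github.com/asif080199/ExamPapers | logic/question_processing.py | extractLabelandAns
-- ===== SOURCE A (Python) =====
-- def extractLabelandAns(content):
-- 	labellist = list()
-- 	anslist = list()
--
-- 	if content != '':
-- 		labelanslist = content.split('"')
-- 		counter = 0
-- 		while counter < len(labelanslist):
-- 			temp = ("$$"+labelanslist[counter]+"$$").replace(";", "$$<br/>$$").replace(" ", " \space ")
-- 			labellist.append(temp)
--
-- 			if (counter+1) < len(labelanslist):
-- 				anslist.append(labelanslist[counter+1])
-- 			counter+=2
--
-- 	return {'labellist': labellist, 'anslist': anslist}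
-- ===== SOURCE B (Python) =====
-- def extractLabelandAns(content):
--     if content == '':
--         return {'labellist': [], 'anslist': []}
--     pieces = content.split('"')
--     labellist = [('$$' + p + '$$').replace(';', '$$<br/>$$').replace(' ', ' \space ')
--                  for p in pieces[0::2]]
--     anslist = pieces[1::2]
--     return {'labellist': labellist, 'anslist': anslist}
-- ===== Notes on version B (the rewrite author's own statement) =====
-- stated objective: simpler
-- what changed: Replaces the counter-stepping-by-2 interleaved while loop over the split pieces with two independent strided passes: anslist is the odd-indexed slice pieces[1::2] taken verbatim, and labellist is a comprehension formatting the even-indexed slice pieces[0::2].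
import Mathlib
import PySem

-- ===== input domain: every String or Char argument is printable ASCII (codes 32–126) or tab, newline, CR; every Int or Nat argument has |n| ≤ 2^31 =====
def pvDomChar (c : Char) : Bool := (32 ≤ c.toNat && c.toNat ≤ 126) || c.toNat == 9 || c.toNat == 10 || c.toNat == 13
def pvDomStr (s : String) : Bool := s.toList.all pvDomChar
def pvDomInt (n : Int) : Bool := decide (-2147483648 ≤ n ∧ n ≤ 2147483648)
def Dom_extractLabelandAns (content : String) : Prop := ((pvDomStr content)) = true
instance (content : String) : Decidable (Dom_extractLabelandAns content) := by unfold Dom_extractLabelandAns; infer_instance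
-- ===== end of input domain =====

-- B replaces A's single counter-stepping-by-2 while loop with two independent strided
-- slices over the split pieces (objective: simpler).

-- ===== PORT A =====
-- the formatting expression ("$$"+piece+"$$").replace(";","$$<br/>$$").replace(" "," \space "),
-- identical text in both Pythons
def pvFmt (cs : List Char) : List Char :=
  PySem.Chars.replace
    (PySem.Chars.replace ("$$".toList ++ cs ++ "$$".toList) ";".toList "$$<br/>$$".toList)
    " ".toList " \\space ".toList

-- the while loop of A: counter starts at 0 and steps by 2, appending to both accumulators
def pvWhileA (xs : List (List Char)) (counter : Nat)
    (lab ans : List (List Char)) : List (List Char) × List (List Char) :=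
  if counter < xs.length then
    let temp := pvFmt (PySem.List.pyGetD xs (counter : Int) [])
    let lab' := lab ++ [temp]
    let ans' := if counter + 1 < xs.length
                then ans ++ [PySem.List.pyGetD xs ((counter : Int) + 1) []]
                else ans
    pvWhileA xs (counter + 2) lab' ans'
  else (lab, ans)
termination_by xs.length - counter

def extractLabelandAns (content : String) : List (String × List String) :=
  let p :=
    if content ≠ "" then
      pvWhileA (PySem.Chars.splitOn content.toList "\"".toList) 0 [] []
    else ([], [])
  [("labellist", p.1.map String.ofList), ("anslist", p.2.map String.ofList)]

-- ===== PORT B =====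
def extractLabelandAns_alt (content : String) : List (String × List String) :=
  if content = "" then [("labellist", []), ("anslist", [])]
  else
    let pieces := PySem.Chars.splitOn content.toList "\"".toList
    let labellist := ((PySem.List.slice? pieces (some 0) none 2).getD []).map pvFmt
    let anslist := (PySem.List.slice? pieces (some 1) none 2).getD []
    [("labellist", labellist.map String.ofList), ("anslist", anslist.map String.ofList)]

-- ===== PRECONDITION & SPEC =====
def Spec_extractLabelandAns (content : String) (out : List (String × List String)) : Prop := out = extractLabelandAns_alt content
instance (content : String) (out : List (String × List String)) : Decidable (Spec_extractLabelandAns content out) := by unfold Spec_extractLabelandAns; infer_instance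

-- ===== CLAIM (what is proved, stated in full; the proofs are below) =====
def Claim_equal_extractLabelandAns : Prop := ∀ (content : String), Dom_extractLabelandAns content → Spec_extractLabelandAns content (extractLabelandAns content)

-- ===== LEMMAS AND PROOFS =====

-- every second element of a list, starting at the head (what both strided passes compute)
def pvStride2 {α : Type} : List α → List α
  | [] => []
  | [x] => [x]
  | x :: _ :: r => x :: pvStride2 r

theorem pvStride2_drop {α : Type} (xs : List α) (s : Nat) (h : s < xs.length) :
    pvStride2 (xs.drop s) = xs[s] :: pvStride2 (xs.drop (s + 2)) := by
  have hd : xs.drop s = xs[s] :: xs.drop (s + 1) := List.drop_eq_getElem_cons h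
  have h2 : xs.drop (s + 2) = (xs.drop (s + 1)).drop 1 := by rw [List.drop_drop]
  cases hds : xs.drop (s + 1) with
  | nil => rw [hd, hds, h2, hds]; rfl
  | cons y r => rw [hd, hds, h2, hds]; rfl

theorem pvStride2_filterMap {α : Type} (xs : List α) (s : Nat) :
    (List.range ((xs.length - s + 1) / 2)).filterMap (fun k => xs[s + 2 * k]?) =
      pvStride2 (xs.drop s) := by
  by_cases h : s < xs.length
  · have hcount : (xs.length - s + 1) / 2 = (xs.length - (s + 2) + 1) / 2 + 1 := by omega
    rw [hcount, List.range_succ_eq_map, List.filterMap_cons, List.filterMap_map]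
    have h0 : xs[s + 2 * 0]? = some xs[s] := by
      simp [List.getElem?_eq_getElem h]
    rw [h0]
    have hfun : ((fun k => xs[s + 2 * k]?) ∘ Nat.succ) = fun k => xs[(s + 2) + 2 * k]? := by
      funext k
      simp only [Function.comp]
      congr 1
      omega
    rw [hfun, pvStride2_filterMap xs (s + 2), pvStride2_drop xs s h]
  · have h1 : (xs.length - s + 1) / 2 = 0 := by omega
    have h2 : xs.drop s = [] := List.drop_eq_nil_of_le (by omega)
    rw [h1, h2]
    rfl
termination_by xs.length - s
decreasing_by omega

-- B's slices compute pvStride2 of the corresponding suffix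
theorem pvSlice2_eq {α : Type} (xs : List α) (s : Nat) :
    PySem.List.slice? xs (some (s : Int)) none 2 = some (pvStride2 (xs.drop s)) := by
  have hs0 : ¬ ((s : Int) < 0) := by omega
  simp only [PySem.List.slice?, PySem.List.sliceIndices, if_neg hs0]
  norm_num
  by_cases h : s < xs.length
  · have hmin : min (s : Int) (xs.length : Int) = (s : Int) := by omega
    rw [hmin, if_pos h]
    have h1 : ((xs.length : Int) - (s : Int) + 2 - 1) = ((xs.length - s + 1 : Nat) : Int) := by omega
    rw [h1]
    have h2 : ((((xs.length - s + 1 : Nat) : Int)) / 2).toNat = (xs.length - s + 1) / 2 := rfl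
    rw [h2, ← pvStride2_filterMap xs s]
    apply List.filterMap_congr
    intro k _
    have hk : ((s : Int) + 2 * (k : Int)).toNat = s + 2 * k := by omega
    rw [hk]
  · have hmin : min (s : Int) (xs.length : Int) = (xs.length : Int) := by omega
    rw [hmin, if_neg h]
    have hnil : xs.drop s = [] := List.drop_eq_nil_of_le (by omega)
    rw [hnil]
    rfl

-- A's while loop appends pvStride2 of the even / odd suffix to the accumulators
theorem pvWhileA_eq (xs : List (List Char)) (c : Nat) (lab ans : List (List Char)) :
    pvWhileA xs c lab ans =
      (lab ++ (pvStride2 (xs.drop c)).map pvFmt, ans ++ pvStride2 (xs.drop (c + 1))) := by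
  rw [pvWhileA]
  by_cases h : c < xs.length
  · rw [if_pos h]
    have hget : PySem.List.pyGetD xs (c : Int) [] = xs[c] := by
      rw [PySem.List.pyGetD_natCast, List.getD_eq_getElem?_getD, List.getElem?_eq_getElem h]
      rfl
    rw [pvWhileA_eq xs (c + 2)]
    rw [pvStride2_drop xs c h]
    by_cases h1 : c + 1 < xs.length
    · have hget1 : PySem.List.pyGetD xs ((c : Int) + 1) [] = xs[c + 1] := by
        have hcast : (c : Int) + 1 = ((c + 1 : Nat) : Int) := by push_cast; ring
        rw [hcast, PySem.List.pyGetD_natCast, List.getD_eq_getElem?_getD,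
          List.getElem?_eq_getElem h1]
        rfl
      rw [if_pos h1]
      rw [pvStride2_drop xs (c + 1) h1]
      simp [hget, hget1]
    · rw [if_neg h1]
      have h2 : xs.drop (c + 1) = [] := List.drop_eq_nil_of_le (by omega)
      have h3 : xs.drop (c + 1 + 2) = [] := List.drop_eq_nil_of_le (by omega)
      simp [hget, h2, h3, pvStride2]
  · rw [if_neg h]
    have h1 : xs.drop c = [] := List.drop_eq_nil_of_le (by omega)
    have h2 : xs.drop (c + 1) = [] := List.drop_eq_nil_of_le (by omega)
    simp [h1, h2, pvStride2]
termination_by xs.length - c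
decreasing_by omega

-- ===== VERDICT (by name: the statement is the Claim_ definition above) =====
theorem extractLabelandAns_spec : Claim_equal_extractLabelandAns := by
  intro content _
  unfold Spec_extractLabelandAns extractLabelandAns extractLabelandAns_alt
  by_cases hc : content = ""
  · simp [hc]
  · have h0 := pvSlice2_eq (PySem.Chars.splitOn content.toList "\"".toList) 0
    have h1 := pvSlice2_eq (PySem.Chars.splitOn content.toList "\"".toList) 1
    rw [Nat.cast_zero] at h0
    rw [Nat.cast_one] at h1
    rw [if_pos hc, if_neg hc, pvWhileA_eq]
    simp only [h0, h1]
    simp [List.drop_one]
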